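-- pv_equiv track=rewrite | github.com/0shimax/chainer-review-net | src/test_caption_net.py | id2sentence
-- ===== SOURCE A (Python) =====
-- def id2sentence(id2token, ids):
--     result = []
--     for _id in ids:
--         try:
--             word = id2token[int(_id)]
--         except Exception as e:
--             word = '<unk>'
--         result.append(word)
--         if word=='<EOS>':
--             break
--     return ' '.join(result)
-- ===== SOURCE B (Python) =====
-- def id2sentence(id2token, ids):
--     def lookup(i):
--         try:
--             return id2token[int(i)]
--         except Exception:
--             return '<unk>'
--     words = [lookup(i) for i in ids]
--     if '<EOS>' in words:
--         idx = words.index('<EOS>')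
--         return ' '.join(words[:idx + 1])
--     return ' '.join(words)
-- ===== Notes on version B (the rewrite author's own statement) =====
-- stated objective: alternative
-- what changed: Replaces the single early-breaking accumulate-and-break loop by a two-pass scheme: map every id through the guarded lookup first, then locate the first '<EOS>' and join the inclusive prefix (or everything if absent).
import Mathlib
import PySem

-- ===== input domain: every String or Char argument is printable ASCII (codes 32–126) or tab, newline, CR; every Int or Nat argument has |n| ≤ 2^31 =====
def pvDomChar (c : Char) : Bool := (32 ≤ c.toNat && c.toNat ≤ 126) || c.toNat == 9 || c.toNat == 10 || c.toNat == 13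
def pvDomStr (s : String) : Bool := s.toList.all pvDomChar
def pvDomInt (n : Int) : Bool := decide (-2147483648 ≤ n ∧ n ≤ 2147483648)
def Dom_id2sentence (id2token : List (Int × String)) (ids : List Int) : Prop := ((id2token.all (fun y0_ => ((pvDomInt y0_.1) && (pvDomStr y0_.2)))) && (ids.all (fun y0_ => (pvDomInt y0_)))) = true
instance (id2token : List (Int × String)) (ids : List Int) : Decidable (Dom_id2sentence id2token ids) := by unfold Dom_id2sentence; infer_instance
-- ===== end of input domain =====

-- ===== PORT A =====
-- B restructures A's early-breaking loop into map + first-'<EOS>' search + inclusive truncate (alternative decomposition, same cost).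
-- early-breaking accumulation loop of A: append looked-up word, stop after '<EOS>'
def id2sentenceLoop (id2token : List (Int × String)) : List Int → List String → List String
  | [], acc => acc.reverse
  | _id :: rest, acc =>
    let word := (PySem.Dict.get? (PySem.Dict.mk id2token) _id).getD "<unk>"
    if word == "<EOS>" then (word :: acc).reverse
    else id2sentenceLoop id2token rest (word :: acc)

def id2sentence (id2token : List (Int × String)) (ids : List Int) : String :=
  PySem.Str.join " " (id2sentenceLoop id2token ids [])

-- ===== PORT B =====
def id2sentence_alt (id2token : List (Int × String)) (ids : List Int) : String :=
  let words := ids.map (fun i => (PySem.Dict.get? (PySem.Dict.mk id2token) i).getD "<unk>")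
  match PySem.List.index? words "<EOS>" with
  | some idx => PySem.Str.join " " (words.take (idx + 1))
  | none => PySem.Str.join " " words

-- ===== PRECONDITION & SPEC =====
def Spec_id2sentence (id2token : List (Int × String)) (ids : List Int) (out : String) : Prop := out = id2sentence_alt id2token ids
instance (id2token : List (Int × String)) (ids : List Int) (out : String) : Decidable (Spec_id2sentence id2token ids out) := by unfold Spec_id2sentence; infer_instance

-- ===== CLAIM (what is proved, stated in full; the proofs are below) =====
def Claim_equal_id2sentence : Prop := ∀ (id2token : List (Int × String)) (ids : List Int), Dom_id2sentence id2token ids → Spec_id2sentence id2token ids (id2sentence id2token ids)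

-- ===== LEMMAS AND PROOFS =====
-- B's truncation, as a function of the word list
def truncEOS (ws : List String) : List String :=
  match PySem.List.index? ws "<EOS>" with
  | some idx => ws.take (idx + 1)
  | none => ws

theorem truncEOS_cons_self (ws : List String) :
    truncEOS ("<EOS>" :: ws) = ["<EOS>"] := by
  rw [truncEOS, PySem.List.index?_cons_self]
  rfl

theorem truncEOS_cons_of_ne (w : String) (ws : List String) (h : w ≠ "<EOS>") :
    truncEOS (w :: ws) = w :: truncEOS ws := by
  rw [truncEOS, PySem.List.index?_cons_of_ne _ h]
  cases hE : PySem.List.index? ws "<EOS>" with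
  | none =>
    rw [PySem.List.index?_eq_idxOf?] at hE
    simp [truncEOS, hE]
  | some i =>
    rw [PySem.List.index?_eq_idxOf?] at hE
    simp [truncEOS, hE, List.take_succ_cons]

theorem id2sentenceLoop_eq (id2token : List (Int × String)) (ids : List Int) (acc : List String) :
    id2sentenceLoop id2token ids acc
      = acc.reverse ++ truncEOS (ids.map (fun i => (PySem.Dict.get? (PySem.Dict.mk id2token) i).getD "<unk>")) := by
  induction ids generalizing acc with
  | nil => simp [id2sentenceLoop, truncEOS, PySem.List.index?]
  | cons x rest ih =>
    simp only [id2sentenceLoop, List.map_cons]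
    set w := (PySem.Dict.get? (PySem.Dict.mk id2token) x).getD "<unk>" with hw
    by_cases h : w = "<EOS>"
    · simp [h, truncEOS_cons_self]
    · simp only [beq_iff_eq, h, if_false, ih, truncEOS_cons_of_ne _ _ h]
      simp

-- ===== VERDICT (by name: the statement is the Claim_ definition above) =====
theorem id2sentence_spec : Claim_equal_id2sentence := by
  intro id2token ids _
  unfold Spec_id2sentence id2sentence id2sentence_alt
  rw [id2sentenceLoop_eq]
  simp only [List.reverse_nil, List.nil_append]
  cases h : PySem.List.index? (ids.map (fun i => (PySem.Dict.get? (PySem.Dict.mk id2token) i).getD "<unk>")) "<EOS>" with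
  | none =>
    rw [PySem.List.index?_eq_idxOf?] at h
    simp [truncEOS, h]
  | some i =>
    rw [PySem.List.index?_eq_idxOf?] at h
    simp [truncEOS, h]
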